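/- GENERATED by c/gen_decode.py: decode facts of the image, one per distinct instruction byte string. -/
import UserX.DecodeImage

#decode_all Vorbis.Dec
  "0f570d1a650100"  -- xorps xmm1,XMMWORD PTR [rip+0x1651a]
  "0f84a5000000"  -- je 10e3e6
  "0f856bffffff"  -- jne 115121
  "0f8d8b000000"  -- jge 10de04
  "0fafe8"  -- imul ebp,eax
  "21d0"  -- and eax,edx
  "3c53"  -- cmp al,0x53
  "410fb6ed"  -- movzx ebp,r13b
  "4181ffff7f0000"  -- cmp r15d,0x7fff
  "4189c1"  -- mov r9d,eax
  "418d46fa"  -- lea eax,[r14-0x6]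
  "41d3ff"  -- sar r15d,cl
  "440fbfe3"  -- movsx r12d,bx
  "4488630c"  -- mov BYTE PTR [rbx+0xc],r12b
  "4489aae4060000"  -- mov DWORD PTR [rdx+0x6e4],r13d
  "448b65e4"  -- mov r12d,DWORD PTR [rbp-0x1c]
  "448d2cc500000000"  -- lea r13d,[rax*8+0x0]
  "45886c2408"  -- mov BYTE PTR [r12+0x8],r13b
  "458bade4060000"  -- mov r13d,DWORD PTR [r13+0x6e4]
  "480fbfdb"  -- movsx rbx,bx
  "4863eb"  -- movsxd rbp,ebx
  "4883e0f8"  -- and rax,0xfffffffffffffff8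
  "48896b30"  -- mov QWORD PTR [rbx+0x30],rbp
  "488b3c2500f01f00"  -- mov rdi,QWORD PTR ds:0x1ff000
  "488b8568ffffff"  -- mov rax,QWORD PTR [rbp-0x98]
  "488d5308"  -- lea rdx,[rbx+0x8]
  "488d7c240f"  -- lea rdi,[rsp+0xf]
  "488dbb38010000"  -- lea rdi,[rbx+0x138]
  "488dbd38080000"  -- lea rdi,[rbp+0x838]
  "48c7042528f01f0002000000"  -- mov QWORD PTR ds:0x1ff028,0x2
  "49036d00"  -- add rbp,QWORD PTR [r13+0x0]
  "4983ee10"  -- sub r14,0x10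
  "498d3c6f"  -- lea rdi,[r15+rbp*2]
  "498dbc2438080000"  -- lea rdi,[r12+0x838]
  "4a896cfb08"  -- mov QWORD PTR [rbx+r15*8+0x8],rbp
  "4c01f3"  -- add rbx,r14
  "4c896c2420"  -- mov QWORD PTR [rsp+0x20],r13
  "4c8b6c2418"  -- mov r13,QWORD PTR [rsp+0x18]
  "4c8d6058"  -- lea r12,[rax+0x58]
  "4d6be403"  -- imul r12,r12,0x3
  "4e8d2ca0"  -- lea r13,[rax+r12*4]
  "660f7edb"  -- movd ebx,xmm3
  "6642c7446500ffff"  -- mov WORD PTR [rbp+r12*2+0x0],0xffff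
  "732f"  -- jae 10138d
  "746c"  -- je 119bb9
  "75cb"  -- jne 10f7a1
  "7cde"  -- jl 103de5
  "7f0e"  -- jg 103ec8
  "81fbff000000"  -- cmp ebx,0xff
  "83e807"  -- sub eax,0x7
  "894c2418"  -- mov DWORD PTR [rsp+0x18],ecx
  "89abe0060000"  -- mov DWORD PTR [rbx+0x6e0],ebp
  "8b442478"  -- mov eax,DWORD PTR [rsp+0x78]
  "8b83d0050000"  -- mov eax,DWORD PTR [rbx+0x5d0]
  "8d5801"  -- lea ebx,[rax+0x1]
  "be1f000000"  -- mov esi,0x1f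
  "c7442408ffffffff"  -- mov DWORD PTR [rsp+0x8],0xffffffff
  "c783f000c000f3f3f3f3"  -- mov DWORD PTR [rbx+0xc000f0],0xf3f3f3f3
  "e80666ffff"  -- call 100720
  "e80f92ffff"  -- call 100800
  "e81985ffff"  -- call 104d40
  "e8236affff"  -- call 100640
  "e82c92ffff"  -- call 100800
  "e836a4feff"  -- call 100800
  "e8417bffff"  -- call 10d1c0
  "e84b75ffff"  -- call 100800
  "e8566fffff"  -- call 103d00
  "e863bdfeff"  -- call 100300
  "e86f2affff"  -- call 100300
  "e87a68ffff"  -- call 100640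
  "e885c7feff"  -- call 100800
  "e88fd3ffff"  -- call 100720
  "e899c5feff"  -- call 100640
  "e8a4a9feff"  -- call 100800
  "e8aefaffff"  -- call 102200
  "e8b853ffff"  -- call 100800
  "e8c2c7feff"  -- call 100720
  "e8cc10ffff"  -- call 100300
  "e8d6a1feff"  -- call 1008e0
  "e8e0befeff"  -- call 100640
  "e8ea2affff"  -- call 100800
  "e8f1b5ffff"  -- call 100640
  "e8fd78ffff"  -- call 100300
  "e934ffffff"  -- jmp 11148d
  "e97bfbffff"  -- jmp 113b22
  "e9d2f6ffff"  -- jmp 113b22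
  "eb37"  -- jmp 108abd
  "ebc3"  -- jmp 1163ae
  "f20f110c24"  -- movsd QWORD PTR [rsp],xmm1
  "f20f59d1"  -- mulsd xmm2,xmm1
  "f30f1043e8"  -- movss xmm0,DWORD PTR [rbx-0x18]
  "f30f1065b8"  -- movss xmm4,DWORD PTR [rbp-0x48]
  "f30f11442438"  -- movss DWORD PTR [rsp+0x38],xmm0
  "f30f1165b0"  -- movss DWORD PTR [rbp-0x50],xmm4
  "f30f5845ec"  -- addss xmm0,DWORD PTR [rbp-0x14]
  "f30f596d40"  -- mulss xmm5,DWORD PTR [rbp+0x40]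
  "f30f5ce1"  -- subss xmm4,xmm1
  "f3410f114608"  -- movss DWORD PTR [r14+0x8],xmm0
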